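-- pv_equiv track=rewrite | github.com/MinChul-Son/for-Coding-Test | 11st.py | solution
-- ===== SOURCE A (Python) =====
-- def solution(S):
--     blocks = []
--     block = S[0]
--     answer = 0
--
--     for i in range(1, len(S)):
--         if block[-1] == S[i]:
--             block += S[i]
--         else:
--             blocks.append(block)
--             block = S[i]
--
--     if block:
--         blocks.append(block)
--
--     blocks = sorted(blocks, key=lambda x: -(len(x)))
--
--     max_block_length = len(blocks[0])
--
--     for i in blocks:
--         answer += (max_block_length - len(i))
--
--     return answer
-- ===== SOURCE B (Python) =====
-- def solution(S):
--     # Change-point indices instead of run grouping: each run spans two consecutive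
--     # boundaries; answer = max gap * number of runs - len(S).
--     n = len(S)
--     cuts = [i for i, (a, b) in enumerate(zip(S, S[1:]), 1) if a != b]
--     bounds = [0] + cuts + [n]
--     gaps = [b - a for a, b in zip(bounds, bounds[1:])]
--     return max(gaps) * (len(bounds) - 1) - n
-- ===== Notes on version B (the rewrite author's own statement) =====
-- stated objective: alternative
-- what changed: B never groups runs at all: it collects the change-point indices where adjacent characters differ, forms the boundary list [0]+cuts+[n], and returns max(boundary gap) * number of runs - len(S), replacing A's block-string building, sort and gap-summing loop with index arithmetic.
-- outside the precondition, e.g. on solution(''): A raises IndexError, B returns 0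
import Mathlib
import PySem

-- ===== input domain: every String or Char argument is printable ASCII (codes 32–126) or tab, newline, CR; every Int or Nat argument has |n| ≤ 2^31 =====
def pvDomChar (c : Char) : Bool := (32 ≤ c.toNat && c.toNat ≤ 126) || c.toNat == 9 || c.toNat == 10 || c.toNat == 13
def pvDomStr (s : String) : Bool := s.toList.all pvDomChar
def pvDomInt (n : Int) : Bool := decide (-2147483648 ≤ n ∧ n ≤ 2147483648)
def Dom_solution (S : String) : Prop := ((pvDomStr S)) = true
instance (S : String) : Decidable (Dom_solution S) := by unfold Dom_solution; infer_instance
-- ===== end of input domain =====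

-- B never builds the run blocks: it collects the change-point indices, and the answer is
-- max boundary gap * number of runs - len(S); no grouping pass, no sort (a different algorithm).
-- A raises IndexError on S = "" (S[0]); Pre_ excludes exactly that input, where B returns 0.

-- ===== PORT A =====
-- A's loop state: (blocks, block); block is a Python string, never empty inside the loop.
def solution (S : String) : Int :=
  match S.toList with
  | [] => 0  -- unreachable inside Pre_solution: S[0] raises IndexError on ""
  | c :: rest =>
    let st := rest.foldl
      (fun (p : List (List Char) × List Char) ch =>
        if p.2.getLast? == some ch then (p.1, p.2 ++ [ch])  -- block[-1] == S[i]: block += S[i]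
        else (p.1 ++ [p.2], [ch]))                          -- blocks.append(block); block = S[i]
      ([], [c])
    let blocks0 := if st.2.isEmpty then st.1 else st.1 ++ [st.2]   -- if block: blocks.append(block)
    let blocks := PySem.List.sorted blocks0 (fun x => -((x.length : Int))) false
    let maxLen : Int := ((blocks.getD 0 []).length : Int)          -- len(blocks[0])
    blocks.foldl (fun acc b => acc + (maxLen - (b.length : Int))) 0

-- ===== PORT B =====
def solution_alt (S : String) : Int :=
  let l := S.toList
  let n : Int := (l.length : Int)
  -- cuts = [i for i, (a, b) in enumerate(zip(S, S[1:]), 1) if a != b]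
  let cuts : List Int :=
    ((PySem.List.enumerate (l.zip l.tail) 1).filter (fun p => p.2.1 != p.2.2)).map (fun p => p.1)
  let bounds : List Int := 0 :: cuts ++ [n]                 -- [0] + cuts + [n]
  let gaps : List Int := (bounds.zip bounds.tail).map (fun p => p.2 - p.1)
  ((PySem.List.max? gaps (fun x => x)).getD 0) * ((bounds.length : Int) - 1) - n

-- ===== PRECONDITION & SPEC =====
-- Pre_ excludes only S = "", where A's S[0] raises IndexError (B returns 0 there).
def Pre_solution (S : String) : Prop := S.toList ≠ []
instance (S : String) : Decidable (Pre_solution S) := by unfold Pre_solution; infer_instance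
def pvWitness_solution : String := "aabcc"

def Spec_solution (S : String) (out : Int) : Prop := out = solution_alt S
instance (S : String) (out : Int) : Decidable (Spec_solution S out) := by unfold Spec_solution; infer_instance

-- ===== CLAIM (what is proved, stated in full; the proofs are below) =====
def Claim_equal_solution : Prop := ∀ (S : String), Dom_solution S → Pre_solution S → Spec_solution S (solution S)
-- ===== LEMMAS AND PROOFS =====

def pvLen (l : List Char) : Int := (l.length : Int)

-- A's loop step
def pvStepA (p : List (List Char) × List Char) (ch : Char) : List (List Char) × List Char :=
  if p.2.getLast? == some ch then (p.1, p.2 ++ [ch]) else (p.1 ++ [p.2], [ch])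

-- common spec: run lengths of x-repeated-k-times followed by t
def pvRLcont : Char → Int → List Char → List Int
  | _, k, [] => [k]
  | x, k, c :: t => if c = x then pvRLcont c (k + 1) t else k :: pvRLcont c 1 t

-- cut positions of x :: t, t's first element sitting at absolute position s
def pvCU : Char → List Char → Int → List Int
  | _, [], _ => []
  | x, c :: t, s => if c = x then pvCU c t (s + 1) else s :: pvCU c t (s + 1)

def pvDiffs (r : List Int) : List Int := (r.zip r.tail).map (fun p => p.2 - p.1)

theorem pvDiffs_cons (a b : Int) (r : List Int) :
    pvDiffs (a :: b :: r) = (b - a) :: pvDiffs (b :: r) := rfl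

theorem pvRLcont_sum (t : List Char) : ∀ (x : Char) (k : Int),
    (pvRLcont x k t).sum = k + t.length := by
  induction t with
  | nil => intro x k; simp [pvRLcont]
  | cons c t ih =>
    intro x k
    by_cases h : c = x
    · rw [show pvRLcont x k (c :: t) = pvRLcont c (k + 1) t by simp [pvRLcont, h], ih]
      push_cast [List.length_cons]; ring
    · rw [show pvRLcont x k (c :: t) = k :: pvRLcont c 1 t by simp [pvRLcont, h]]
      simp [ih]; ring

-- B's comprehension computes pvCU
theorem pvCuts_eq (t : List Char) : ∀ (x : Char) (s : Int),
    ((PySem.List.enumerate ((x :: t).zip t) s).filter (fun p => p.2.1 != p.2.2)).map (fun p => p.1)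
      = pvCU x t s := by
  induction t with
  | nil => intro x s; simp [PySem.List.enumerate_nil, pvCU]
  | cons c t ih =>
    intro x s
    have hz : (x :: c :: t).zip (c :: t) = (x, c) :: (c :: t).zip t := rfl
    rw [hz, PySem.List.enumerate_cons]
    by_cases h : c = x
    · simp [pvCU, h, ih]
    · have : (x != c) = true := by simp [bne]; exact fun e => h e.symm
      simp [pvCU, h, this, ih]

-- the gaps of the boundary list are exactly the run lengths
theorem pvGaps_eq (t : List Char) : ∀ (x : Char) (k s : Int),
    pvDiffs ((s - k) :: pvCU x t s ++ [s + (t.length : Int)]) = pvRLcont x k t := by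
  induction t with
  | nil =>
    intro x k s
    simp [pvCU, pvRLcont, pvDiffs]
  | cons c t ih =>
    intro x k s
    rw [show s + (((c :: t).length : Int)) = (s + 1) + (t.length : Int) by
      push_cast [List.length_cons]; ring]
    by_cases h : c = x
    · have ih1 := ih c (k + 1) (s + 1)
      rw [show (s + 1 : Int) - (k + 1) = s - k by ring] at ih1
      rw [show pvCU x (c :: t) s = pvCU c t (s + 1) by simp [pvCU, h], ih1]
      simp [pvRLcont, h]
    · have ih1 := ih c 1 (s + 1)
      rw [show (s + 1 : Int) - 1 = s by ring] at ih1
      rw [show pvCU x (c :: t) s = s :: pvCU c t (s + 1) by simp [pvCU, h]]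
      simp only [List.cons_append]
      rw [pvDiffs_cons, show s - (s - k) = k by ring,
        show pvRLcont x k (c :: t) = k :: pvRLcont c 1 t by simp [pvRLcont, h]]
      congr 1

-- A's fold produces blocks whose lengths are pvRLcont
theorem pvInvA (t : List Char) : ∀ (bs : List (List Char)) (b : List Char) (x : Char),
    b.getLast? = some x →
    ((t.foldl pvStepA (bs, b)).1 ++ [(t.foldl pvStepA (bs, b)).2]).map pvLen
        = bs.map pvLen ++ pvRLcont x (pvLen b) t
      ∧ (t.foldl pvStepA (bs, b)).2 ≠ [] := by
  induction t with
  | nil =>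
    intro bs b x hb
    refine ⟨by simp [pvRLcont], fun hnil => ?_⟩
    simp only [List.foldl_nil] at hnil
    rw [hnil] at hb; simp at hb
  | cons ch t ih =>
    intro bs b x hb
    by_cases h : x = ch
    · have hstep : pvStepA (bs, b) ch = (bs, b ++ [ch]) := by
        simp [pvStepA, hb, h]
      have hlast : (b ++ [ch]).getLast? = some ch := by simp
      obtain ⟨h1, h2⟩ := ih bs (b ++ [ch]) ch hlast
      refine ⟨?_, by simpa [List.foldl_cons, hstep] using h2⟩
      rw [List.foldl_cons, hstep, h1]
      simp [pvRLcont, h, pvLen]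
    · have hxc : ¬ ch = x := fun e => h e.symm
      have hstep : pvStepA (bs, b) ch = (bs ++ [b], [ch]) := by
        have hff : (b.getLast? == some ch) = false := by simp [hb]; exact h
        simp [pvStepA, hff]
      obtain ⟨h1, h2⟩ := ih (bs ++ [b]) [ch] ch (by simp)
      refine ⟨?_, by simpa [List.foldl_cons, hstep] using h2⟩
      rw [List.foldl_cons, hstep, h1]
      rw [show pvRLcont x (pvLen b) (ch :: t) = pvLen b :: pvRLcont ch 1 t by
        simp [pvRLcont, hxc]]
      simp [pvLen]

theorem pvFoldSub (M : Int) (l : List (List Char)) (a : Int) :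
    l.foldl (fun acc b => acc + (M - (b.length : Int))) a
      = a + M * l.length - (l.map pvLen).sum := by
  induction l generalizing a with
  | nil => simp
  | cons x t ih => simp [ih, pvLen]; ring

-- head of sorted-by-descending-length is the maximum of the lengths
theorem pvMaxHead (blocks : List (List Char)) (hne : blocks ≠ []) :
    ((((PySem.List.sorted blocks (fun x => -((x.length : Int))) false).getD 0 []).length : Int)
      = (PySem.List.max? (blocks.map pvLen) (fun x => x)).getD 0) := by
  obtain ⟨m, t, hs⟩ : ∃ m t, PySem.List.sorted blocks (fun x => -((x.length : Int))) false = m :: t := by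
    rcases hsrt : PySem.List.sorted blocks (fun x => -((x.length : Int))) false with _ | ⟨m, t⟩
    · exact absurd ((PySem.List.sorted_eq_nil_iff _ _ _).mp hsrt) hne
    · exact ⟨m, t, rfl⟩
  have hm : m ∈ blocks := (PySem.List.mem_sorted _ _ _ _).mp (by rw [hs]; exact List.mem_cons_self)
  obtain ⟨v, hv⟩ : ∃ v, PySem.List.max? (blocks.map pvLen) (fun x => x) = some v := by
    rcases hmx : PySem.List.max? (blocks.map pvLen) (fun x => x) with _ | v
    · exact absurd (by simpa using (PySem.List.max?_eq_none_iff _ _).mp hmx) hne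
    · exact ⟨v, rfl⟩
  have hvm := PySem.List.max?_mem hv
  obtain ⟨y, hy, hyv⟩ := List.mem_map.mp hvm
  have h1 : pvLen m ≤ v := PySem.List.max?_isMax hv _ (List.mem_map_of_mem hm)
  have h2 : v ≤ pvLen m := by
    have := PySem.List.key_head_sorted_le _ _ hs y hy
    simp only [pvLen] at *
    omega
  rw [hs, hv]
  simp only [List.getD_cons_zero, Option.getD_some, pvLen] at *
  omega

theorem solution_eq (S : String) (h : S.toList ≠ []) : solution S = solution_alt S := by
  rcases hS : S.toList with _ | ⟨a, rest⟩
  · exact absurd hS h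
  obtain ⟨hmap, hne2⟩ := pvInvA rest [] [a] a (by simp)
  set st := rest.foldl pvStepA ([], [a]) with hst
  set RL : List Int := pvRLcont a 1 rest with hRL
  have hmap' : (st.1 ++ [st.2]).map pvLen = RL := by
    simpa [pvLen] using hmap
  -- A side
  have hA : solution S
      = ((PySem.List.max? RL (fun x => x)).getD 0) * RL.length - RL.sum := by
    unfold solution
    rw [hS]
    have hfold : rest.foldl
        (fun (p : List (List Char) × List Char) ch =>
          if p.2.getLast? == some ch then (p.1, p.2 ++ [ch]) else (p.1 ++ [p.2], [ch]))
        ([], [a]) = st := rfl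
    simp only [hfold]
    have hblocks0 : (if st.2.isEmpty then st.1 else st.1 ++ [st.2]) = st.1 ++ [st.2] := by
      simp [List.isEmpty_iff, hne2]
    rw [hblocks0]
    have hbne : st.1 ++ [st.2] ≠ [] := by simp
    have hperm : (PySem.List.sorted (st.1 ++ [st.2]) (fun x => -((x.length : Int))) false).Perm
        (st.1 ++ [st.2]) := PySem.List.sorted_perm _ _ _
    rw [pvFoldSub, pvMaxHead _ hbne, hmap']
    rw [hperm.length_eq, ((hperm.map pvLen).sum_eq : _), hmap']
    have : (st.1 ++ [st.2]).length = RL.length := by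
      rw [← hmap']; simp
    rw [this]; ring
  -- B side
  have hzip : S.toList.zip S.toList.tail = (a :: rest).zip rest := by rw [hS]; simp
  have hcuts := pvCuts_eq rest a 1
  have hn : ((S.toList.length : Int)) = 1 + (rest.length : Int) := by
    rw [hS]; push_cast [List.length_cons]; ring
  have hgaps := pvGaps_eq rest a 1 1
  have hbounds : ((0 : Int) :: pvCU a rest 1 ++ [(S.toList.length : Int)])
      = ((1 : Int) - 1) :: pvCU a rest 1 ++ [1 + (rest.length : Int)] := by
    rw [hn]; norm_num
  have hB : solution_alt S
      = ((PySem.List.max? RL (fun x => x)).getD 0) * RL.length - (S.toList.length : Int) := by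
    unfold solution_alt
    simp only [hzip, hcuts]
    have hg : pvDiffs ((0 : Int) :: pvCU a rest 1 ++ [(S.toList.length : Int)]) = RL := by
      rw [hbounds]; exact hgaps
    have hglen : (pvDiffs ((0 : Int) :: pvCU a rest 1 ++ [(S.toList.length : Int)])).length
        = ((0 : Int) :: pvCU a rest 1 ++ [(S.toList.length : Int)]).length - 1 := by
      simp [pvDiffs]
    rw [show ((((0 : Int) :: pvCU a rest 1 ++ [(S.toList.length : Int)]).zip
          ((0 : Int) :: pvCU a rest 1 ++ [(S.toList.length : Int)]).tail).map (fun p => p.2 - p.1))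
        = pvDiffs ((0 : Int) :: pvCU a rest 1 ++ [(S.toList.length : Int)]) from rfl]
    rw [hg]
    congr 1
    congr 1
    have : RL.length = ((0 : Int) :: pvCU a rest 1 ++ [(S.toList.length : Int)]).length - 1 := by
      rw [← hg]; exact hglen
    rw [this]
    have hpos : 1 ≤ ((0 : Int) :: pvCU a rest 1 ++ [(S.toList.length : Int)]).length := by
      simp
    push_cast [Nat.cast_sub hpos]
    ring
  have hsum : RL.sum = (S.toList.length : Int) := by
    rw [hRL, pvRLcont_sum, hn]
  rw [hA, hB, hsum]

-- ===== VERDICT (by name: the statement is the Claim_ definition above) =====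
theorem solution_spec : Claim_equal_solution := by
  intro S _ hpre
  unfold Spec_solution
  exact solution_eq S hpre
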